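-- pv_equiv track=rewrite | github.com/tuananhquadeptrai/Degivn_V | Devign/C-Vul-Devign/devign_pipeline/kaggle_simple_v2.py | group_criterion_lines
-- ===== SOURCE A (Python) =====
-- from typing import List, Dict, Any, Optional, Tuple
--
-- def group_criterion_lines(criterion_lines: List[int], max_gap: int = 3) -> List[List[int]]:
--     """Group nearby criterion lines together."""
--     if not criterion_lines:
--         return []
--
--     groups = []
--     current = []
--     for l in sorted(criterion_lines):
--         if not current or l - current[-1] <= max_gap:
--             current.append(l)
--         else:
--             groups.append(current)
--             current = [l]
--     if current:
--         groups.append(current)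
--     return groups
-- ===== SOURCE B (Python) =====
-- def group_criterion_lines(criterion_lines, max_gap=3):
--     """Group nearby criterion lines via two index pointers over the sorted list."""
--     s = sorted(criterion_lines)
--     n = len(s)
--     groups = []
--     i = 0
--     while i < n:
--         j = i + 1
--         while j < n and s[j] - s[j - 1] <= max_gap:
--             j += 1
--         groups.append(s[i:j])
--         i = j
--     return groups
-- ===== Notes on version B (the rewrite author's own statement) =====
-- stated objective: alternative
-- what changed: A sweeps the sorted list building a current group element by element with a flush-on-gap accumulator and a final flush; B instead runs two index pointers over the sorted list, advancing j to the end of each gap-chained run and emitting the slice s[i:j], with no accumulator or final flush.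
import Mathlib
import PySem

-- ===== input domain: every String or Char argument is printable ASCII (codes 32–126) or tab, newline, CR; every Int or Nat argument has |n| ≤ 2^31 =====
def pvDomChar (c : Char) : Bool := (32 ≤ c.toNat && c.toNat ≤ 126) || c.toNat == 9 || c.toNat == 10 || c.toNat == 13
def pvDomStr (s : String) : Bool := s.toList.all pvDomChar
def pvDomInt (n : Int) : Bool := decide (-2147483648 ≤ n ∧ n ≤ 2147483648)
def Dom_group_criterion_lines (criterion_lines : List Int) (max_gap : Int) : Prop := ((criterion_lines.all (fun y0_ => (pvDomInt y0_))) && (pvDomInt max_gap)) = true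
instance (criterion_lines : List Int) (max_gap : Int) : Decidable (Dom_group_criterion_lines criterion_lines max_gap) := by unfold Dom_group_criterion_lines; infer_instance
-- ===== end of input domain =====

-- B replaces A's accumulator-and-flush sweep by a two-pointer scan over the sorted list
-- that emits each gap-chained run as a slice (alternative decomposition, same cost).

-- ===== PORT A =====
-- one loop iteration of A: `if not current or l - current[-1] <= max_gap: append else flush`
-- (current[-1] on a nonempty list = getLast?; the `none` branch is Python's `not current`)
def gclStep (max_gap : Int) (st : List (List Int) × List Int) (l : Int) : List (List Int) × List Int :=
  match st.2.getLast? with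
  | none => (st.1, st.2 ++ [l])
  | some last => if l - last ≤ max_gap then (st.1, st.2 ++ [l]) else (st.1 ++ [st.2], [l])

def group_criterion_lines (criterion_lines : List Int) (max_gap : Int) : List (List Int) :=
  if criterion_lines = [] then []
  else
    let st := (PySem.List.sorted criterion_lines (fun x => x) false).foldl (gclStep max_gap) ([], [])
    if st.2 ≠ [] then st.1 ++ [st.2] else st.1

-- ===== PORT B =====
-- Source B's inner while: advance j while j < n and s[j] - s[j-1] <= max_gap
-- (s[j] and s[j-1] are in range whenever taken, 0 ≤ j-1 < j < n = len s, so getD is exact)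
def gclFindEnd (max_gap : Int) (s : List Int) (n : Nat) (j : Nat) : Nat :=
  if h : j < n ∧ s.getD j 0 - s.getD (j - 1) 0 ≤ max_gap then gclFindEnd max_gap s n (j + 1) else j
  termination_by n - j
  decreasing_by omega

-- outer-loop termination: j only moves forward
theorem gclFindEnd_ge (max_gap : Int) (s : List Int) (n : Nat) : ∀ (k j : Nat), k = n - j → j ≤ gclFindEnd max_gap s n j := by
  intro k
  induction k using Nat.strong_induction_on with
  | _ k ih =>
      intro j hk
      rw [gclFindEnd]
      split
      · next h => have := ih (n - (j + 1)) (by omega) (j + 1) rfl; omega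
      · omega

-- Source B's outer while over i, appending the slice s[i:j]
def gclOuter (max_gap : Int) (s : List Int) (n : Nat) (groups : List (List Int)) (i : Nat) : List (List Int) :=
  if _ : i < n then
    let j := gclFindEnd max_gap s n (i + 1)
    gclOuter max_gap s n (groups ++ [PySem.List.slice s (some (i : Int)) (some (j : Int))]) j
  else groups
  termination_by n - i
  decreasing_by
    have := gclFindEnd_ge max_gap s n (n - (i + 1)) (i + 1) rfl
    omega

def group_criterion_lines_alt (criterion_lines : List Int) (max_gap : Int) : List (List Int) :=
  let s := PySem.List.sorted criterion_lines (fun x => x) false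
  gclOuter max_gap s s.length [] 0

-- ===== PRECONDITION & SPEC =====
def Spec_group_criterion_lines (criterion_lines : List Int) (max_gap : Int) (out : List (List Int)) : Prop := out = group_criterion_lines_alt criterion_lines max_gap
instance (criterion_lines : List Int) (max_gap : Int) (out : List (List Int)) : Decidable (Spec_group_criterion_lines criterion_lines max_gap out) := by unfold Spec_group_criterion_lines; infer_instance

-- ===== CLAIM (what is proved, stated in full; the proofs are below) =====
def Claim_equal_group_criterion_lines : Prop := ∀ (criterion_lines : List Int) (max_gap : Int), Dom_group_criterion_lines criterion_lines max_gap → Spec_group_criterion_lines criterion_lines max_gap (group_criterion_lines criterion_lines max_gap)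

-- ===== LEMMAS AND PROOFS =====

-- proof-side middle form of the grouping: peel one gap-chained run at a time
def takeGroup (max_gap : Int) (prev : Int) : List Int → List Int × List Int
  | [] => ([], [])
  | y :: ys =>
      if y - prev ≤ max_gap then
        let p := takeGroup max_gap y ys
        (y :: p.1, p.2)
      else ([], y :: ys)

theorem takeGroup_snd_length_le (max_gap : Int) : ∀ (prev : Int) (xs : List Int),
    (takeGroup max_gap prev xs).2.length ≤ xs.length := by
  intro prev xs
  induction xs generalizing prev with
  | nil => simp [takeGroup]
  | cons y ys ih =>
      simp only [takeGroup]
      split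
      · exact le_trans (ih y) (Nat.le_succ _)
      · simp

theorem takeGroup_fst_append_snd (max_gap : Int) : ∀ (prev : Int) (xs : List Int),
    (takeGroup max_gap prev xs).1 ++ (takeGroup max_gap prev xs).2 = xs := by
  intro prev xs
  induction xs generalizing prev with
  | nil => simp [takeGroup]
  | cons y ys ih =>
      simp only [takeGroup]
      split
      · simpa using ih y
      · simp

def gclSplit (max_gap : Int) : List Int → List (List Int)
  | [] => []
  | x :: xs =>
      let p := takeGroup max_gap x xs
      (x :: p.1) :: gclSplit max_gap p.2
  termination_by xs => xs.length
  decreasing_by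
    exact Nat.lt_succ_of_le (takeGroup_snd_length_le max_gap x xs)

-- A's final flush, as a function of the loop state
def gclFin (st : List (List Int) × List Int) : List (List Int) :=
  if st.2 ≠ [] then st.1 ++ [st.2] else st.1

-- A-side: folding A's step from a nonempty current group whose last element is prev
-- produces exactly the peeled runs, with the first run merged into current
theorem fold_eq_split (max_gap : Int) : ∀ (xs : List Int) (groups : List (List Int)) (cur : List Int) (prev : Int),
    cur.getLast? = some prev →
    gclFin (xs.foldl (gclStep max_gap) (groups, cur))
      = groups ++ (cur ++ (takeGroup max_gap prev xs).1) :: gclSplit max_gap (takeGroup max_gap prev xs).2 := by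
  intro xs
  induction xs with
  | nil =>
      intro groups cur prev h
      have hne : cur ≠ [] := by intro hc; simp [hc] at h
      simp [gclFin, takeGroup, gclSplit, hne]
  | cons y ys ih =>
      intro groups cur prev h
      simp only [List.foldl_cons, gclStep, h, takeGroup]
      by_cases hle : y - prev ≤ max_gap
      · simp only [hle, if_pos]
        rw [ih (groups := groups) (cur := cur ++ [y]) (prev := y) (by simp)]
        simp
      · simp only [hle, if_false]
        rw [ih (groups := groups ++ [cur]) (cur := [y]) (prev := y) (by simp)]
        simp [gclSplit]

-- B-side: the inner while starting at i+1 stops exactly after the run chained to s[i]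
theorem findEnd_eq (max_gap : Int) (s : List Int) : ∀ (k i : Nat), k = s.length - i → i < s.length →
    gclFindEnd max_gap s s.length (i + 1)
      = i + 1 + (takeGroup max_gap (s.getD i 0) (s.drop (i + 1))).1.length := by
  intro k
  induction k using Nat.strong_induction_on with
  | _ k ih =>
      intro i hk hi
      rw [gclFindEnd]
      by_cases hn : i + 1 < s.length
      · have hdrop : s.drop (i + 1) = s.getD (i + 1) 0 :: s.drop (i + 1 + 1) := by
          rw [List.getD_eq_getElem s 0 hn, List.drop_eq_getElem_cons hn]
        by_cases hle : s.getD (i + 1) 0 - s.getD i 0 ≤ max_gap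
        · rw [dif_pos ⟨hn, hle⟩, ih (s.length - (i + 1)) (by omega) (i + 1) rfl hn, hdrop]
          simp only [takeGroup, if_pos hle, List.length_cons]
          omega
        · rw [dif_neg (fun hc => hle hc.2), hdrop]
          simp only [takeGroup]
          rw [if_neg hle]
          simp
      · have hdrop : s.drop (i + 1) = [] := by
          rw [List.drop_eq_nil_iff]; omega
        rw [dif_neg (fun hc => absurd hc.1 (by omega)), hdrop]
        simp [takeGroup]

-- B-side: the outer while emits exactly the peeled runs of the remaining suffix
theorem outer_eq_split (max_gap : Int) (s : List Int) : ∀ (k i : Nat) (groups : List (List Int)), k = s.length - i →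
    gclOuter max_gap s s.length groups i = groups ++ gclSplit max_gap (s.drop i) := by
  intro k
  induction k using Nat.strong_induction_on with
  | _ k ih =>
      intro i groups hk
      rw [gclOuter]
      by_cases hi : i < s.length
      · have hdrop : s.drop i = s.getD i 0 :: s.drop (i + 1) := by
          rw [List.getD_eq_getElem s 0 hi, List.drop_eq_getElem_cons hi]
        set p := takeGroup max_gap (s.getD i 0) (s.drop (i + 1)) with hp
        have hj : gclFindEnd max_gap s s.length (i + 1) = i + 1 + p.1.length :=
          findEnd_eq max_gap s (s.length - i) i rfl hi
        have happ : p.1 ++ p.2 = s.drop (i + 1) := takeGroup_fst_append_snd max_gap _ _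
        have hlen : p.1.length ≤ s.length - (i + 1) := by
          have := congrArg List.length happ
          simp at this; omega
        have hslice : PySem.List.slice s (some (i : Int)) (some ((i + 1 + p.1.length : Nat) : Int))
            = s.getD i 0 :: p.1 := by
          rw [PySem.List.slice_natCast]
          have h1 : i + 1 + p.1.length - i = p.1.length + 1 := by omega
          rw [h1, hdrop, List.take_succ_cons, ← happ, List.take_left]
        have hdrop2 : s.drop (i + 1 + p.1.length) = p.2 := by
          have h2 : s.drop (i + 1 + p.1.length) = (s.drop (i + 1)).drop p.1.length := by
            rw [List.drop_drop]
          rw [h2, ← happ, List.drop_left]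
        have hsplit : gclSplit max_gap (s.drop i) = (s.getD i 0 :: p.1) :: gclSplit max_gap p.2 := by
          rw [hdrop, gclSplit, ← hp]
        rw [dif_pos hi]
        simp only [hj, hslice]
        rw [ih (s.length - (i + 1 + p.1.length)) (by omega) (i + 1 + p.1.length) _ rfl, hdrop2, hsplit]
        simp
      · have hdrop : s.drop i = [] := by rw [List.drop_eq_nil_iff]; omega
        rw [dif_neg hi, hdrop]
        simp [gclSplit]

-- ===== VERDICT (by name: the statement is the Claim_ definition above) =====
theorem group_criterion_lines_spec : Claim_equal_group_criterion_lines := by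
  intro criterion_lines max_gap _
  unfold Spec_group_criterion_lines group_criterion_lines group_criterion_lines_alt
  rw [outer_eq_split max_gap _ _ 0 [] rfl]
  simp only [List.drop_zero, List.nil_append]
  by_cases hnil : criterion_lines = []
  · subst hnil
    simp [PySem.List.sorted, gclSplit]
  · have hs : PySem.List.sorted criterion_lines (fun x => x) false ≠ [] := by
      intro hc
      have := (PySem.List.sorted_perm (xs := criterion_lines) (key := fun x => x) (rev := false)).length_eq
      rw [hc] at this
      exact hnil (List.eq_nil_of_length_eq_zero this.symm)
    rcases hx : PySem.List.sorted criterion_lines (fun x => x) false with _ | ⟨x, xs⟩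
    · exact absurd hx hs
    · simp only [hnil, if_false]
      show gclFin ((x :: xs).foldl (gclStep max_gap) ([], [])) = _
      rw [List.foldl_cons]
      have hstep : gclStep max_gap ([], []) x = ([], [x]) := by simp [gclStep]
      rw [hstep, fold_eq_split max_gap xs [] [x] x (by simp)]
      simp [gclSplit]
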